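-- pv_equiv track=rewrite | github.com/liliiakhranovska/Python | tests/TEST_compute_all_bishop_possible_moves.py | __compute_all_bishop_possible_moves
-- ===== SOURCE A (Python) =====
-- def __reset_to_initial_coordinates (x,y, initial_space):
--     initial_x, initial_y = initial_space
--     (x,y)=initial_x, initial_y
--     return (x,y)
--
-- def __compute_all_bishop_possible_moves (initial_space):
--     all_possible_bishop_moves=[]
--     x=y=0
--     (x,y) = __reset_to_initial_coordinates (x,y,initial_space)
--     while x<7 and y<7:
--         x += 1
--         y += 1
--         all_possible_bishop_moves.append((x,y))
--     (x,y) = __reset_to_initial_coordinates (x,y,initial_space)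
--     while x>0 and y<7:
--         x -= 1
--         y += 1
--         all_possible_bishop_moves.append((x,y))
--     (x,y) = __reset_to_initial_coordinates (x,y,initial_space)
--     while x>0 and y>0:
--         x -= 1
--         y -= 1
--         all_possible_bishop_moves.append((x,y))
--     (x,y) = __reset_to_initial_coordinates (x,y,initial_space)
--     while x<7 and y>0:
--         x += 1
--         y -= 1
--         all_possible_bishop_moves.append((x,y))
--     return all_possible_bishop_moves
-- ===== SOURCE B (Python) =====
-- def __compute_all_bishop_possible_moves(initial_space):
--     x, y = initial_space
--     out = []
--     for dx, dy in [(1, 1), (-1, 1), (-1, -1), (1, -1)]: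
--         n = max(0, min(7 - x if dx > 0 else x, 7 - y if dy > 0 else y))
--         out += [(x + dx * (k + 1), y + dy * (k + 1)) for k in range(n)]
--     return out
-- ===== Notes on version B (the rewrite author's own statement) =====
-- stated objective: simpler
-- what changed: Replaces the four hand-rolled while loops (each re-resetting to the initial square) by a single pass over a direction table with a closed-form step count per direction (max(0, min(bound_x, bound_y))) and a range comprehension.
import Mathlib
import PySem

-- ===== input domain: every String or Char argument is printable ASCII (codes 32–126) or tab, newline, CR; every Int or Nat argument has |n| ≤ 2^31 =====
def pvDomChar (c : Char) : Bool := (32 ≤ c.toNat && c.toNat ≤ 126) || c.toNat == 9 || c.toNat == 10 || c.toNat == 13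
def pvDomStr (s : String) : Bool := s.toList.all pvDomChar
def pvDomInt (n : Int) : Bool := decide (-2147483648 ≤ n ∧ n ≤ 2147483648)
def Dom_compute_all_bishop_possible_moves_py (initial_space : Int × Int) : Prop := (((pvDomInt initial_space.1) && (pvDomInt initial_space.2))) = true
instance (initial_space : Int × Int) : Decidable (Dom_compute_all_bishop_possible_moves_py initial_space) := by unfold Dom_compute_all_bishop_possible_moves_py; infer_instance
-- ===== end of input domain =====

-- B replaces A's four separate while loops by one pass over a direction table with a closed-form per-direction step count (simpler; same cost, return value only).
-- ===== PORT A =====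
-- A's helper __reset_to_initial_coordinates: returns the initial coordinates unchanged
def reset_to_initial_coordinates_py (x y : Int) (initial_space : Int × Int) : Int × Int :=
  let _ := (x, y)
  (initial_space.1, initial_space.2)

-- the four while loops of A, each a structural recursion on one stepping coordinate
def bishopLoopNE (x y : Int) : List (Int × Int) :=
  if h : x < 7 ∧ y < 7 then (x + 1, y + 1) :: bishopLoopNE (x + 1) (y + 1) else []
termination_by (7 - x).toNat
decreasing_by omega

def bishopLoopNW (x y : Int) : List (Int × Int) :=
  if h : x > 0 ∧ y < 7 then (x - 1, y + 1) :: bishopLoopNW (x - 1) (y + 1) else []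
termination_by x.toNat
decreasing_by omega

def bishopLoopSW (x y : Int) : List (Int × Int) :=
  if h : x > 0 ∧ y > 0 then (x - 1, y - 1) :: bishopLoopSW (x - 1) (y - 1) else []
termination_by x.toNat
decreasing_by omega

def bishopLoopSE (x y : Int) : List (Int × Int) :=
  if h : x < 7 ∧ y > 0 then (x + 1, y - 1) :: bishopLoopSE (x + 1) (y - 1) else []
termination_by (7 - x).toNat
decreasing_by omega

def compute_all_bishop_possible_moves_py (initial_space : Int × Int) : List (Int × Int) :=
  let x : Int := 0
  let y : Int := 0
  let p1 := reset_to_initial_coordinates_py x y initial_space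
  let l1 := bishopLoopNE p1.1 p1.2
  let p2 := reset_to_initial_coordinates_py p1.1 p1.2 initial_space
  let l2 := bishopLoopNW p2.1 p2.2
  let p3 := reset_to_initial_coordinates_py p2.1 p2.2 initial_space
  let l3 := bishopLoopSW p3.1 p3.2
  let p4 := reset_to_initial_coordinates_py p3.1 p3.2 initial_space
  let l4 := bishopLoopSE p4.1 p4.2
  l1 ++ l2 ++ l3 ++ l4

-- ===== PORT B =====
def compute_all_bishop_possible_moves_py_alt (initial_space : Int × Int) : List (Int × Int) :=
  let x := initial_space.1
  let y := initial_space.2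
  (([((1 : Int), (1 : Int)), (-1, 1), (-1, -1), (1, -1)]).flatMap (fun d =>
    let n : Int := max 0 (min (if d.1 > 0 then 7 - x else x) (if d.2 > 0 then 7 - y else y))
    (List.range n.toNat).map (fun (k : Nat) => (x + d.1 * ((k : Int) + 1), y + d.2 * ((k : Int) + 1)))))

-- ===== PRECONDITION & SPEC =====
def Spec_compute_all_bishop_possible_moves_py (initial_space : Int × Int) (out : List (Int × Int)) : Prop := out = compute_all_bishop_possible_moves_py_alt initial_space
instance (initial_space : Int × Int) (out : List (Int × Int)) : Decidable (Spec_compute_all_bishop_possible_moves_py initial_space out) := by unfold Spec_compute_all_bishop_possible_moves_py; infer_instance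

-- ===== CLAIM (what is proved, stated in full; the proofs are below) =====
def Claim_equal_compute_all_bishop_possible_moves_py : Prop := ∀ (initial_space : Int × Int), Dom_compute_all_bishop_possible_moves_py initial_space → Spec_compute_all_bishop_possible_moves_py initial_space (compute_all_bishop_possible_moves_py initial_space)

-- ===== LEMMAS AND PROOFS =====

theorem bishopLoopNE_eq (x y : Int) :
    bishopLoopNE x y =
      (List.range (min (7 - x) (7 - y)).toNat).map
        (fun (k : Nat) => (x + ((k : Int) + 1), y + ((k : Int) + 1))) := by
  fun_induction bishopLoopNE x y with
  | case1 x y h ih =>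
      have hn : (min (7 - x) (7 - y)).toNat
          = (min (7 - (x + 1)) (7 - (y + 1))).toNat + 1 := by omega
      rw [ih, hn, List.range_succ_eq_map, List.map_cons, List.map_map]
      congr 1
      refine List.map_congr_left ?_
      intro a ha
      simp only [Function.comp_apply, Prod.mk.injEq]
      omega
  | case2 x y h =>
      have : (min (7 - x) (7 - y)).toNat = 0 := by omega
      simp [this]

theorem bishopLoopNW_eq (x y : Int) :
    bishopLoopNW x y =
      (List.range (min x (7 - y)).toNat).map
        (fun (k : Nat) => (x - ((k : Int) + 1), y + ((k : Int) + 1))) := by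
  fun_induction bishopLoopNW x y with
  | case1 x y h ih =>
      have hn : (min x (7 - y)).toNat
          = (min (x - 1) (7 - (y + 1))).toNat + 1 := by omega
      rw [ih, hn, List.range_succ_eq_map, List.map_cons, List.map_map]
      congr 1
      refine List.map_congr_left ?_
      intro a ha
      simp only [Function.comp_apply, Prod.mk.injEq]
      omega
  | case2 x y h =>
      have : (min x (7 - y)).toNat = 0 := by omega
      simp [this]

theorem bishopLoopSW_eq (x y : Int) :
    bishopLoopSW x y =
      (List.range (min x y).toNat).map
        (fun (k : Nat) => (x - ((k : Int) + 1), y - ((k : Int) + 1))) := by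
  fun_induction bishopLoopSW x y with
  | case1 x y h ih =>
      have hn : (min x y).toNat = (min (x - 1) (y - 1)).toNat + 1 := by omega
      rw [ih, hn, List.range_succ_eq_map, List.map_cons, List.map_map]
      congr 1
      refine List.map_congr_left ?_
      intro a ha
      simp only [Function.comp_apply, Prod.mk.injEq]
      omega
  | case2 x y h =>
      have : (min x y).toNat = 0 := by omega
      simp [this]

theorem bishopLoopSE_eq (x y : Int) :
    bishopLoopSE x y =
      (List.range (min (7 - x) y).toNat).map
        (fun (k : Nat) => (x + ((k : Int) + 1), y - ((k : Int) + 1))) := by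
  fun_induction bishopLoopSE x y with
  | case1 x y h ih =>
      have hn : (min (7 - x) y).toNat = (min (7 - (x + 1)) (y - 1)).toNat + 1 := by omega
      rw [ih, hn, List.range_succ_eq_map, List.map_cons, List.map_map]
      congr 1
      refine List.map_congr_left ?_
      intro a ha
      simp only [Function.comp_apply, Prod.mk.injEq]
      omega
  | case2 x y h =>
      have : (min (7 - x) y).toNat = 0 := by omega
      simp [this]

-- ===== VERDICT (by name: the statement is the Claim_ definition above) =====
theorem compute_all_bishop_possible_moves_py_spec : Claim_equal_compute_all_bishop_possible_moves_py := by
  intro p _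
  unfold Spec_compute_all_bishop_possible_moves_py
  unfold compute_all_bishop_possible_moves_py compute_all_bishop_possible_moves_py_alt
    reset_to_initial_coordinates_py
  simp only [List.flatMap_cons, List.flatMap_nil, List.append_nil, List.append_assoc]
  rw [bishopLoopNE_eq, bishopLoopNW_eq, bishopLoopSW_eq, bishopLoopSE_eq]
  have hmax : ∀ m : Int, (max 0 m).toNat = m.toNat := by intro m; omega
  norm_num [hmax]
  refine congrArg₂ (· ++ ·) ?_ (congrArg₂ (· ++ ·) ?_ ?_)
  all_goals
    refine List.map_congr_left fun k _ => ?_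
    simp only [Prod.mk.injEq]
    constructor <;> first | trivial | omega
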